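-- pv_equiv track=rewrite | github.com/AdamZhouSE/pythonHomework | Code/CodeRecords/2472/59018/262599.py | feichongfu
-- ===== SOURCE A (Python) =====
-- def feichongfu(N,S):
--     dicxx={}
--     for j in S:
--         if j not in dicxx.keys():
--             dicxx[j]=1
--         else:
--             dicxx[j]=dicxx[j]+1
--     a=list(dicxx.keys())[list(dicxx.values()).index(1)]
--     if len(a)>=1:
--         return a[0]
--     else:
--         return -1
-- ===== SOURCE B (Python) =====
-- def feichongfu(N, S):
--     a = next(x for x in S if S.count(x) == 1)
--     return a[0] if a else -1
-- ===== Notes on version B (the rewrite author's own statement) =====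
-- stated objective: idiomatic
-- what changed: B drops the frequency dictionary and the parallel keys()/values() lists with .index(1) entirely: it takes the first element of S whose S.count(x) is 1 via a generator expression, trading the hash map for a direct quadratic membership count; Pre_ excludes inputs where no element occurs exactly once (A raises ValueError there) and inputs whose first exactly-once element is the empty string (A returns the int -1, not a str).
-- outside the precondition, e.g. on feichongfu(0, ['']): A returns -1, B returns -1
import Mathlib
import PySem

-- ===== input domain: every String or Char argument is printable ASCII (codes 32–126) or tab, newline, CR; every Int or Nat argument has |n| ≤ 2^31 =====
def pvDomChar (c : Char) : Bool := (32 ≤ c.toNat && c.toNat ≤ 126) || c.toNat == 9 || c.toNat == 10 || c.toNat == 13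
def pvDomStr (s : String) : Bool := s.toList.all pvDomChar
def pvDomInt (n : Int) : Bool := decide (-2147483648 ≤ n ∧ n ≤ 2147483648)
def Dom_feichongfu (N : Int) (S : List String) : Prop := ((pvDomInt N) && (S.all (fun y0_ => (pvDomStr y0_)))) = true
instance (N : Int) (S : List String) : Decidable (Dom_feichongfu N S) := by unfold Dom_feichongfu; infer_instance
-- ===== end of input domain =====

-- B replaces A's frequency dictionary and parallel keys()/values() lists with a dict-free scan that
-- tests each element by S.count (idiomatic one-liner; RETURN-value equivalence proved on Pre_).

-- ===== PORT A =====
def feichongfu (N : Int) (S : List String) : String :=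
  let dicxx : PySem.Dict String Int := S.foldl (fun d j =>
    match PySem.Dict.get? d j with
    | none => PySem.Dict.insert d j 1
    | some v => PySem.Dict.insert d j (v + 1)) PySem.Dict.empty
  match PySem.List.index? (PySem.Dict.values dicxx) 1 with
  | none => ""                                    -- .index(1) raises ValueError: excluded by Pre_
  | some i =>
    let a := PySem.List.pyGetD (PySem.Dict.keys dicxx) (i : Int) ""
    if 1 ≤ PySem.Str.len a then ((PySem.Str.pyGet? a 0).map (fun ch => String.ofList [ch])).getD ""
    else ""                                       -- Python returns the int -1 (not a str): excluded by Pre_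

-- ===== PORT B =====
-- Source B: a = next(x for x in S if S.count(x) == 1); return a[0] if a else -1
def feichongfu_alt (_N : Int) (S : List String) : String :=
  match S.find? (fun x => PySem.List.count S x == 1) with
  | none => ""                                    -- next() raises StopIteration: excluded by Pre_
  | some a =>
    if a ≠ "" then ((PySem.Str.pyGet? a 0).map (fun ch => String.ofList [ch])).getD ""
    else ""                                       -- Python returns the int -1 (not a str): excluded by Pre_

-- ===== PRECONDITION & SPEC =====
-- Pre_ excludes the inputs where A raises ValueError (no element occurs exactly once) and those where
-- the first exactly-once element is the empty string, on which A returns the int -1, not a str.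
def Pre_feichongfu (N : Int) (S : List String) : Prop :=
  (S.find? (fun x => (S.count x : Int) == 1)).getD "" ≠ ""
instance (N : Int) (S : List String) : Decidable (Pre_feichongfu N S) := by
  unfold Pre_feichongfu; infer_instance

def pvWitness_feichongfu : Int × List String := (2, ["a", "b", "a"])

def Spec_feichongfu (N : Int) (S : List String) (out : String) : Prop := out = feichongfu_alt N S
instance (N : Int) (S : List String) (out : String) : Decidable (Spec_feichongfu N S out) := by
  unfold Spec_feichongfu; infer_instance

-- ===== CLAIM (what is proved, stated in full; the proofs are below) =====
def Claim_equal_feichongfu : Prop := ∀ (N : Int) (S : List String), Dom_feichongfu N S → Pre_feichongfu N S → Spec_feichongfu N S (feichongfu N S)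

-- ===== LEMMAS AND PROOFS =====

-- the value A produces from the first exactly-once element a
def pvFin (a : String) : String :=
  if 1 ≤ PySem.Str.len a then ((PySem.Str.pyGet? a 0).map (fun ch => String.ofList [ch])).getD "" else ""

theorem pv_orElse_none_right {α : Type} (o : Option α) : (o.orElse fun _ => none) = o := by
  cases o <;> rfl

-- find? commutes with accumulating Set.add (Python first-occurrence dedup)
theorem pv_find_foldl_add {α : Type} [BEq α] [LawfulBEq α] (p : α → Bool) :
    ∀ (l : List α) (s : PySem.Set α),
      (l.foldl PySem.Set.add s).find? p = ((s.find? p).orElse fun _ => l.find? p) := by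
  intro l
  induction l with
  | nil =>
    intro s
    simp only [List.foldl_nil, List.find?_nil, pv_orElse_none_right]
  | cons x l ih =>
    intro s
    simp only [List.foldl_cons, ih]
    by_cases hc : PySem.Set.contains s x = true
    · have hx : x ∈ s := (PySem.Set.contains_iff s x).mp hc
      have hsadd : PySem.Set.add s x = s := by simp [PySem.Set.add, hx]
      rw [hsadd]
      cases hfs : s.find? p with
      | some a => rfl
      | none =>
        have hpx : p x = false := by
          cases hpx' : p x
          · rfl
          · exact absurd hpx' (by simpa using List.find?_eq_none.mp hfs x hx)
        simp [Option.orElse, List.find?, hpx]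
    · have hx : x ∉ s := fun hm => hc ((PySem.Set.contains_iff s x).mpr hm)
      have hsadd : PySem.Set.add s x = s ++ [x] := by simp [PySem.Set.add, hx]
      rw [hsadd, List.find?_append]
      cases hfs : s.find? p with
      | some a => rfl
      | none => cases hpx : p x <;> simp [Option.orElse, List.find?, hpx]

-- find? on the Python dedup equals find? on the original list
theorem pv_find_ofList {α : Type} [BEq α] [LawfulBEq α] (p : α → Bool) (l : List α) :
    (PySem.Set.ofList l).find? p = l.find? p := by
  have h := pv_find_foldl_add p l ([] : PySem.Set α)
  simpa [PySem.Set.ofList_eq_foldl] using h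

-- A's per-element dict update equals the counter update
theorem pv_step_eq :
    (fun (d : PySem.Dict String Int) j =>
      match PySem.Dict.get? d j with
      | none => PySem.Dict.insert d j 1
      | some v => PySem.Dict.insert d j (v + 1))
    = fun (d : PySem.Dict String Int) x => PySem.Dict.insert d x (PySem.Dict.getD d x 0 + 1) := by
  funext d j
  cases h : PySem.Dict.get? d j with
  | none => simp [PySem.Dict.getD, h]
  | some v => simp [PySem.Dict.getD, h]

-- A's .index into the parallel values list, characterised by find? on the keys list
theorem pv_index_map {α : Type} (c : α → Int) :
    ∀ K : List α,
      (PySem.List.index? (K.map c) 1).bind (fun i => K[i]?) = K.find? (fun k => c k == 1) := by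
  intro K
  induction K with
  | nil => rfl
  | cons k K ih =>
    rw [List.map_cons]
    by_cases h : c k = 1
    · rw [h, PySem.List.index?_cons_self]
      simp [List.find?, h]
    · rw [PySem.List.index?_cons_of_ne (K.map c) h]
      have hb : (c k == 1) = false := by simpa using h
      cases ho : PySem.List.index? (K.map c) 1 with
      | none =>
        rw [ho] at ih
        simp only [Option.map_none, Option.bind_none] at ih ⊢
        simp [List.find?, hb, ← ih]
      | some i =>
        rw [ho] at ih
        simp only [Option.map_some, Option.bind_some] at ih ⊢
        have hstep : (k :: K)[i + 1]? = K[i]? := by simp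
        rw [hstep, ih]
        simp [List.find?, hb]

-- A computes the first-exactly-once value
theorem pv_A_eq (N : Int) (S : List String) :
    feichongfu N S
      = match S.find? (fun x => (S.count x : Int) == 1) with
        | none => ""
        | some a => pvFin a := by
  unfold feichongfu
  rw [pv_step_eq, PySem.Dict.foldl_insert_getD_add_one_eq_counter]
  dsimp only
  have hv : (PySem.Dict.counter S).values
      = (PySem.Set.ofList S).map (fun k => (S.count k : Int)) := by
    have := PySem.Dict.items_counter (xs := S)
    simp [PySem.Dict.values, this]
  have hk : (PySem.Dict.counter S).keys = PySem.Set.ofList S := PySem.Dict.keys_counter S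
  rw [hv, hk]
  have hidx := pv_index_map (fun k => (S.count k : Int)) (PySem.Set.ofList S)
  rw [pv_find_ofList] at hidx
  cases ho : PySem.List.index? ((PySem.Set.ofList S).map (fun k => (S.count k : Int))) 1 with
  | none =>
    rw [ho] at hidx
    simp only [Option.bind_none] at hidx
    rw [← hidx]
  | some i =>
    rw [ho] at hidx
    simp only [Option.bind_some] at hidx
    obtain ⟨hlt, -, -⟩ := PySem.List.getElem_of_index?_eq_some ho
    rw [List.length_map] at hlt
    have hg : (PySem.Set.ofList S)[i]? = some (PySem.Set.ofList S)[i] := List.getElem?_eq_getElem hlt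
    rw [hg] at hidx
    have hpg : PySem.List.pyGetD (PySem.Set.ofList S) (i : Int) "" = (PySem.Set.ofList S)[i] := by
      rw [PySem.List.pyGetD_natCast]
      simp [List.getD, hg]
    dsimp only
    rw [hpg, ← hidx]
    rfl

-- B's count test is A's: PySem.List.count S x == 1 ↔ (S.count x : Int) == 1
theorem pv_pred_eq (S : List String) :
    (fun x => PySem.List.count S x == 1) = (fun x => ((S.count x : Int) == 1)) := by
  funext x
  rw [PySem.List.count_eq]
  by_cases h : List.count x S = 1 <;> simp [h]

-- A's emptiness test (len ≥ 1) equals B's truthiness test (a ≠ "")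
theorem pv_fin_eq (a : String) :
    pvFin a = if a ≠ "" then ((PySem.Str.pyGet? a 0).map (fun ch => String.ofList [ch])).getD ""
              else "" := by
  unfold pvFin
  by_cases h : a = ""
  · subst h; rfl
  · have hne : a.toList ≠ [] := fun hn => h (by
      have h2 : String.ofList a.toList = a := String.ofList_toList
      rw [← h2, hn])
    have hlen : 1 ≤ PySem.Str.len a := by
      rw [PySem.Str.len_eq]
      have : 0 < a.toList.length := List.length_pos_iff.mpr hne
      omega
    rw [if_pos hlen, if_pos h]

-- ===== VERDICT (by name: the statement is the Claim_ definition above) =====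
theorem feichongfu_spec : Claim_equal_feichongfu := by
  intro N S _ _
  unfold Spec_feichongfu feichongfu_alt
  rw [pv_A_eq, pv_pred_eq]
  cases hf : S.find? (fun x => ((S.count x : Int) == 1)) with
  | none => rfl
  | some a => exact pv_fin_eq a
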